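-- pv_equiv track=rewrite | github.com/mikehipps/simple-dfs | csv-match/scripts/build_name_datasets.py | build_suffixes
-- ===== SOURCE A (Python) =====
-- from typing import Dict, Iterable, List, Set
--
-- def normalize_token(token: str) -> str:
--     return " ".join(token.split()).strip().lower()
--
-- def build_suffixes(vendor_suffixes: Iterable[str], overrides: Iterable[str]) -> List[str]:
--     suffix_set: Set[str] = set()
--     for token in vendor_suffixes:
--         token_norm = normalize_token(str(token).replace(".", "").replace(",", ""))
--         if token_norm:
--             suffix_set.add(token_norm)
--     for token in overrides:
--         token_norm = normalize_token(str(token).replace(".", "").replace(",", ""))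
--         if token_norm:
--             suffix_set.add(token_norm)
--     return sorted(suffix_set)
-- ===== SOURCE B (Python) =====
-- def normalize_token(token: str) -> str:
--     return " ".join(token.split()).strip().lower()
--
-- def build_suffixes(vendor_suffixes, overrides):
--     # Maintain a sorted, duplicate-free result incrementally: for each
--     # normalized token, find its position by binary search and insert it
--     # there unless already present.  No set and no sort call.
--     result = []
--     for token in list(vendor_suffixes) + list(overrides):
--         t = normalize_token(str(token).replace(".", "").replace(",", ""))
--         if not t:
--             continue
--         lo, hi = 0, len(result)
--         while lo < hi:
--             mid = (lo + hi) // 2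
--             if result[mid] < t:
--                 lo = mid + 1
--             else:
--                 hi = mid
--         if lo == len(result) or result[lo] != t:
--             result.insert(lo, t)
--     return result
-- ===== Notes on version B (the rewrite author's own statement) =====
-- stated objective: alternative
-- what changed: Replaces hash-set accumulation plus a final sort with an online ordered-insertion algorithm: the result list is kept sorted and duplicate-free at every step by binary-searching each token's position and inserting it there unless already present (no set, no sort call).
import Mathlib
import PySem

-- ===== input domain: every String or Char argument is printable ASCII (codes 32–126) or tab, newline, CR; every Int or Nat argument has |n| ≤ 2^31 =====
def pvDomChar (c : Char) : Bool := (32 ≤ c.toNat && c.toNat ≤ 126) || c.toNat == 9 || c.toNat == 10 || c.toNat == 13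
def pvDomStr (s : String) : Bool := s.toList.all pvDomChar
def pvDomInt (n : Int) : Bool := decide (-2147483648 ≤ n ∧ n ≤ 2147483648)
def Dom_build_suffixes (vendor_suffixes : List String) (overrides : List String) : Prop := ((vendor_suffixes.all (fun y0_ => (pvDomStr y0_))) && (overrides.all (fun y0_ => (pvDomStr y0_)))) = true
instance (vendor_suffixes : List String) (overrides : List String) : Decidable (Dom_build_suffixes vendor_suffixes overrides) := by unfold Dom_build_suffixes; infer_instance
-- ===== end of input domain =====

-- B replaces A's hash-set accumulation plus final sort with an online ordered-insertion pass that keeps the result sorted and duplicate-free at every step; same return value.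

-- ===== PORT A =====
-- normalize_token(str(token).replace(".", "").replace(",", "")) — helper shared verbatim by both Pythons
def pvNorm (token : String) : String :=
  PySem.Str.lower (PySem.Str.strip (PySem.Str.join " " (PySem.Str.split₀
    (PySem.Str.replace (PySem.Str.replace token "." "") "," ""))))

def build_suffixes (vendor_suffixes : List String) (overrides : List String) : List String :=
  PySem.List.sorted
    (overrides.foldl (fun suffix_set token =>
        if pvNorm token ≠ "" then PySem.Set.add suffix_set (pvNorm token) else suffix_set)
      (vendor_suffixes.foldl (fun suffix_set token =>
        if pvNorm token ≠ "" then PySem.Set.add suffix_set (pvNorm token) else suffix_set)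
        PySem.Set.empty))
    (fun x => x) false

-- ===== PORT B =====
-- 'lo, hi = 0, len(result); while lo < hi: mid = (lo+hi)//2; if result[mid] < t: lo = mid+1 else: hi = mid'
-- fuel = hi - lo bounds the iteration count; result[mid] is always in range when lo < hi ≤ len(result),
-- so 'getD mid ""' reads exactly the element Python reads
def pvBis (result : List String) (t : String) : Nat → Nat → Nat → Nat
  | 0, lo, _ => lo
  | fuel + 1, lo, hi =>
    if lo < hi then
      let mid := (lo + hi) / 2
      if result.getD mid "" < t then pvBis result t fuel (mid + 1) hi
      else pvBis result t fuel lo mid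
    else lo

-- 'if lo == len(result) or result[lo] != t: result.insert(lo, t)'
def pvIns (result : List String) (t : String) : List String :=
  let i := pvBis result t result.length 0 result.length
  if i = result.length ∨ result[i]? ≠ some t then PySem.List.insert result (i : Int) t else result

def build_suffixes_alt (vendor_suffixes : List String) (overrides : List String) : List String :=
  (vendor_suffixes ++ overrides).foldl (fun result token =>
    let t := pvNorm token
    if t ≠ "" then pvIns result t else result) []

-- ===== PRECONDITION & SPEC =====
def Spec_build_suffixes (vendor_suffixes : List String) (overrides : List String) (out : List String) : Prop := out = build_suffixes_alt vendor_suffixes overrides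
instance (vendor_suffixes : List String) (overrides : List String) (out : List String) : Decidable (Spec_build_suffixes vendor_suffixes overrides out) := by unfold Spec_build_suffixes; infer_instance

-- ===== CLAIM (what is proved, stated in full; the proofs are below) =====
def Claim_equal_build_suffixes : Prop := ∀ (vendor_suffixes : List String) (overrides : List String), Dom_build_suffixes vendor_suffixes overrides → Spec_build_suffixes vendor_suffixes overrides (build_suffixes vendor_suffixes overrides)

-- ===== LEMMAS AND PROOFS =====

-- clean recursive form of one ordered-insertion step
def insortU (t : String) : List String → List String
  | [] => [t]
  | x :: xs => if t < x then t :: x :: xs else if t = x then x :: xs else x :: insortU t xs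

-- linear-scan reference index: first position whose element is not < t
def pvScan (result : List String) (t : String) : Nat :=
  match result with
  | [] => 0
  | x :: xs => if x < t then pvScan xs t + 1 else 0

-- the ordered-insertion step, expressed with the linear-scan index
def pvScanIns (result : List String) (t : String) : List String :=
  let i := pvScan result t
  if i = result.length ∨ result[i]? ≠ some t then PySem.List.insert result (i : Int) t else result

theorem pvScan_le (xs : List String) (t : String) : pvScan xs t ≤ xs.length := by
  induction xs with
  | nil => simp [pvScan]
  | cons x xs ih => simp only [pvScan, List.length_cons]; split_ifs <;> omega

-- the linear-scan index: everything before it is < t, the element at it (if any) is not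
theorem pvScan_spec (l : List String) (t : String) :
    (∀ i, i < pvScan l t → l.getD i "" < t) ∧
    (pvScan l t < l.length → ¬ l.getD (pvScan l t) "" < t) := by
  induction l with
  | nil => simp [pvScan]
  | cons x xs ih =>
    by_cases hx : x < t
    · simp only [pvScan, if_pos hx]
      refine ⟨fun i hi => ?_, fun hlen => ?_⟩
      · cases i with
        | zero => simpa using hx
        | succ j => simpa using ih.1 j (by omega)
      · simpa using ih.2 (by simpa using hlen)
    · simp only [pvScan, if_neg hx]
      exact ⟨fun i hi => by omega, fun _ => by simpa using hx⟩

-- on a strictly sorted list, "element < t" is downward closed in the index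
theorem getD_lt_mono (l : List String) (t : String) (hs : l.Pairwise (· < ·))
    (i j : Nat) (hij : i ≤ j) (hj : j < l.length) (h : l.getD j "" < t) :
    l.getD i "" < t := by
  rcases Nat.eq_or_lt_of_le hij with rfl | hlt
  · exact h
  · rw [List.getD_eq_getElem l "" hj] at h
    rw [List.getD_eq_getElem l "" (by omega)]
    exact lt_trans ((List.pairwise_iff_getElem.mp hs) i j (by omega) hj hlt) h

-- on a strictly sorted list there is only one index with the scan property
theorem scan_index_unique (l : List String) (t : String)
    (r1 r2 : Nat) (h1 : r1 ≤ l.length) (h2 : r2 ≤ l.length)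
    (p1 : ∀ i, i < r1 → l.getD i "" < t) (q1 : r1 < l.length → ¬ l.getD r1 "" < t)
    (p2 : ∀ i, i < r2 → l.getD i "" < t) (q2 : r2 < l.length → ¬ l.getD r2 "" < t) :
    r1 = r2 := by
  by_contra hne
  rcases Nat.lt_or_ge r1 r2 with h | h
  · exact q1 (by omega) (p2 r1 h)
  · have : r2 < r1 := by omega
    exact q2 (by omega) (p1 r2 this)

-- the binary search maintains its bracketing invariant and lands on the scan index property
theorem pvBis_spec (l : List String) (t : String) (hs : l.Pairwise (· < ·)) :
    ∀ (fuel lo hi : Nat), lo ≤ hi → hi ≤ l.length → hi - lo ≤ fuel →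
    (∀ i, i < lo → l.getD i "" < t) →
    (∀ i, hi ≤ i → i < l.length → ¬ l.getD i "" < t) →
    (pvBis l t fuel lo hi ≤ l.length) ∧
    (∀ i, i < pvBis l t fuel lo hi → l.getD i "" < t) ∧
    (pvBis l t fuel lo hi < l.length → ¬ l.getD (pvBis l t fuel lo hi) "" < t) := by
  intro fuel
  induction fuel with
  | zero =>
    intro lo hi hle hhi hfuel hlo hhi2
    have : lo = hi := by omega
    subst this
    exact ⟨by simpa [pvBis] using hhi, fun i hi => hlo i hi, fun hlen => hhi2 _ le_rfl hlen⟩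
  | succ fuel ih =>
    intro lo hi hle hhi hfuel hlo hhi2
    by_cases hlh : lo < hi
    · have hmid1 : lo ≤ (lo + hi) / 2 := by omega
      have hmid2 : (lo + hi) / 2 < hi := by omega
      simp only [pvBis, if_pos hlh]
      by_cases hm : l.getD ((lo + hi) / 2) "" < t
      · rw [if_pos hm]
        exact ih ((lo + hi) / 2 + 1) hi (by omega) hhi (by omega)
          (fun i hi' => getD_lt_mono l t hs i ((lo + hi) / 2) (by omega) (by omega) hm) hhi2
      · rw [if_neg hm]
        refine ih lo ((lo + hi) / 2) (by omega) (by omega) (by omega) hlo ?_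
        intro i hi' hlen hcon
        exact hm (getD_lt_mono l t hs ((lo + hi) / 2) i hi' hlen hcon)
    · have : lo = hi := by omega
      subst this
      simp only [pvBis, if_neg hlh]
      exact ⟨by omega, fun i hi => hlo i hi, fun hlen => hhi2 _ le_rfl hlen⟩

-- on a sorted list, binary search finds exactly the linear-scan index
theorem pvBis_eq_pvScan (l : List String) (t : String) (hs : l.Pairwise (· < ·)) :
    pvBis l t l.length 0 l.length = pvScan l t := by
  obtain ⟨hle, hp, hq⟩ := pvBis_spec l t hs l.length 0 l.length (by omega) le_rfl (by omega)
    (by omega) (fun i hi hlen => by omega)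
  obtain ⟨hp', hq'⟩ := pvScan_spec l t
  exact scan_index_unique l t _ _ hle (pvScan_le l t) hp hq hp' hq'

-- on a sorted list, the binary-search step is the linear-scan step
theorem pvIns_eq_pvScanIns (l : List String) (t : String) (hs : l.Pairwise (· < ·)) :
    pvIns l t = pvScanIns l t := by
  unfold pvIns pvScanIns
  rw [pvBis_eq_pvScan l t hs]

-- the linear-scan step is the clean recursive ordered insertion
theorem pvScanIns_eq (result : List String) (t : String) : pvScanIns result t = insortU t result := by
  induction result with
  | nil => simp [pvScanIns, insortU, pvScan, PySem.List.insert_zero]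
  | cons x xs ih =>
    by_cases hx : x < t
    · have hs : pvScan (x :: xs) t = pvScan xs t + 1 := by simp [pvScan, hx]
      have hlen := pvScan_le xs t
      have hii : PySem.List.insert (x :: xs) ((pvScan xs t + 1 : Nat) : Int) t
          = x :: PySem.List.insert xs ((pvScan xs t : Nat) : Int) t := by
        rw [PySem.List.insert_natCast _ _ _ (by simpa using Nat.succ_le_succ hlen),
            PySem.List.insert_natCast _ _ _ hlen]
        simp [List.take_succ_cons, List.drop_succ_cons]
      have hcond : ((pvScan (x :: xs) t = (x :: xs).length ∨ (x :: xs)[pvScan (x :: xs) t]? ≠ some t))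
          ↔ (pvScan xs t = xs.length ∨ xs[pvScan xs t]? ≠ some t) := by
        rw [hs]; simp
      have hins : insortU t (x :: xs) = x :: insortU t xs := by
        have h1 : ¬ t < x := lt_asymm hx
        have h2 : t ≠ x := ne_of_gt hx
        simp [insortU, h1, h2]
      unfold pvScanIns
      rw [hins, ← ih]
      unfold pvScanIns
      by_cases hc : pvScan xs t = xs.length ∨ xs[pvScan xs t]? ≠ some t
      · rw [if_pos (hcond.mpr hc), if_pos hc, hs, hii]
      · rw [if_neg (fun h => hc (hcond.mp h)), if_neg hc]
    · have hsc : pvScan (x :: xs) t = 0 := by simp [pvScan, hx]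
      by_cases he : t = x
      · subst he
        have hns : insortU t (t :: xs) = t :: xs := by simp [insortU]
        show (if pvScan (t :: xs) t = (t :: xs).length ∨ (t :: xs)[pvScan (t :: xs) t]? ≠ some t
            then PySem.List.insert (t :: xs) ((pvScan (t :: xs) t : Nat) : Int) t else t :: xs)
          = insortU t (t :: xs)
        rw [hns, hsc]
        simp
      · have hlt : t < x := lt_of_le_of_ne (le_of_not_gt hx) he
        have hns : insortU t (x :: xs) = t :: x :: xs := by simp [insortU, hlt]
        show (if pvScan (x :: xs) t = (x :: xs).length ∨ (x :: xs)[pvScan (x :: xs) t]? ≠ some t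
            then PySem.List.insert (x :: xs) ((pvScan (x :: xs) t : Nat) : Int) t else x :: xs)
          = insortU t (x :: xs)
        rw [hns, hsc]
        rw [if_pos (by right; simpa using fun h => he h.symm)]
        rw [show ((0 : Nat) : Int) = 0 from rfl, PySem.List.insert_zero]

-- one insortU step preserves strict sortedness; membership gains exactly t
theorem insortU_invariant (t : String) (acc : List String) (h : acc.Pairwise (· < ·)) :
    (insortU t acc).Pairwise (· < ·) ∧ ∀ y, (y ∈ insortU t acc ↔ y = t ∨ y ∈ acc) := by
  induction acc with
  | nil => simp [insortU]
  | cons x xs ih =>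
    obtain ⟨hx, hxs⟩ := List.pairwise_cons.mp h
    by_cases h1 : t < x
    · refine ⟨?_, ?_⟩
      · simp only [insortU, if_pos h1]
        exact List.pairwise_cons.mpr ⟨by
          intro b hb
          rcases List.mem_cons.mp hb with rfl | hb'
          · exact h1
          · exact lt_trans h1 (hx b hb'), h⟩
      · intro y; simp [insortU, h1]
    · by_cases h2 : t = x
      · subst h2
        have hns : insortU t (t :: xs) = t :: xs := by simp [insortU]
        refine ⟨by rw [hns]; exact h, fun y => by rw [hns]; simp [List.mem_cons]⟩
      · obtain ⟨hp, hm⟩ := ih hxs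
        have hxt : x < t := lt_of_le_of_ne (le_of_not_gt h1) (fun h => h2 h.symm)
        refine ⟨?_, ?_⟩
        · simp only [insortU, if_neg h1, if_neg h2]
          refine List.pairwise_cons.mpr ⟨?_, hp⟩
          intro b hb
          rcases (hm b).mp hb with rfl | hb'
          · exact hxt
          · exact hx b hb'
        · intro y
          simp only [insortU, if_neg h1, if_neg h2, List.mem_cons, hm y]
          tauto

-- invariant of B's whole loop
theorem foldl_insortU_invariant (l : List String) (acc : List String)
    (h : acc.Pairwise (· < ·)) :
    (l.foldl (fun result token =>
        if pvNorm token ≠ "" then pvIns result (pvNorm token) else result) acc).Pairwise (· < ·) ∧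
    ∀ y, (y ∈ l.foldl (fun result token =>
        if pvNorm token ≠ "" then pvIns result (pvNorm token) else result) acc ↔
      y ∈ acc ∨ y ∈ (l.map pvNorm).filter (fun x => decide (x ≠ ""))) := by
  induction l generalizing acc with
  | nil => simpa using h
  | cons t l ih =>
    simp only [List.foldl_cons, List.map_cons, List.filter_cons]
    by_cases ht : pvNorm t = ""
    · rw [if_neg (fun hc => hc ht), if_neg (by simp [ht])]
      exact ih acc h
    · rw [if_pos ht, if_pos (by simp [ht]), pvIns_eq_pvScanIns _ _ h, pvScanIns_eq]
      obtain ⟨hp1, hm1⟩ := insortU_invariant (pvNorm t) acc h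
      obtain ⟨hp, hm⟩ := ih (insortU (pvNorm t) acc) hp1
      refine ⟨hp, fun y => ?_⟩
      rw [hm y, hm1 y, List.mem_cons]
      exact or_assoc.trans or_left_comm

-- A's add-if-nonempty loop is Set-add folded over the filtered map (stated for any g : String → String)
theorem foldl_addIf_eq (g : String → String) (l : List String) (acc : PySem.Set String) :
    l.foldl (fun acc token =>
      if g token ≠ "" then PySem.Set.add acc (g token) else acc) acc
    = ((l.map g).filter (fun x => decide (x ≠ ""))).foldl PySem.Set.add acc := by
  induction l generalizing acc with
  | nil => rfl
  | cons t l ih =>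
    simp only [List.foldl_cons, List.map_cons, List.filter_cons]
    by_cases h : g t = ""
    · rw [if_neg (fun hc => hc h), if_neg (by simp [h])]
      exact ih acc
    · rw [if_pos h, if_pos (by simp [h])]
      exact ih _

-- ===== VERDICT (by name: the statement is the Claim_ definition above) =====
theorem build_suffixes_spec : Claim_equal_build_suffixes := by
  intro vs os _
  unfold Spec_build_suffixes build_suffixes
  rw [show build_suffixes_alt vs os = (vs ++ os).foldl (fun result token =>
        if pvNorm token ≠ "" then pvIns result (pvNorm token) else result) [] from rfl]
  -- A = sorted (Set.ofList toks) where toks = filter (≠ "") (map pvNorm (vs ++ os))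
  rw [← List.foldl_append, foldl_addIf_eq pvNorm,
      show PySem.Set.empty = ([] : List String) from rfl, ← PySem.Set.ofList_eq_foldl]
  obtain ⟨hp, hm⟩ := foldl_insortU_invariant (vs ++ os) [] (by simp)
  refine PySem.List.sorted_eq_of_perm_of_pairwise_lt _ _ (fun x => x) ?_ ?_
  · rw [List.perm_ext_iff_of_nodup (List.Pairwise.imp (fun h => ne_of_lt h) hp)
      (PySem.Set.nodup_ofList _)]
    intro y
    rw [hm y, PySem.Set.mem_ofList]
    simp
  · exact hp
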